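-- pv_equiv track=rewrite | github.com/xct258/khx-live | 视频处理脚本/视频处理脚本/获取高能片段.py | find_dense_segments
-- ===== SOURCE A (Python) =====
-- def find_dense_segments(timeline, window_size, threshold):
--     n = len(timeline)
--     dense_flags = [0] * n
--     window_sum = sum(timeline[:window_size])
--     for i in range(n - window_size + 1):
--         if i > 0:
--             window_sum = window_sum - timeline[i - 1] + timeline[i + window_size - 1]
--         if window_sum >= threshold:
--             for j in range(i, i + window_size):
--                 if j < n:
--                     dense_flags[j] = 1
--
--     segments = []
--     in_segment = False
--     for i, flag in enumerate(dense_flags):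
--         if flag and not in_segment:
--             seg_start = i
--             in_segment = True
--         elif not flag and in_segment:
--             seg_end = i - 1
--             total_danmaku = sum(timeline[seg_start:seg_end + 1])
--             segments.append((seg_start, seg_end, total_danmaku))
--             in_segment = False
--     if in_segment:
--         seg_end = n - 1
--         total_danmaku = sum(timeline[seg_start:seg_end + 1])
--         segments.append((seg_start, seg_end, total_danmaku))
--     return segments
-- ===== SOURCE B (Python) =====
-- def find_dense_segments(timeline, window_size, threshold):
--     n = len(timeline)
--     prefix = [0]
--     for x in timeline:
--         prefix.append(prefix[-1] + x)
--     delta = [0] * (n + 1)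
--     for l in range(n - window_size + 1):
--         if prefix[l + window_size] - prefix[l] >= threshold:
--             delta[l] += 1
--             delta[l + window_size] -= 1
--     segments = []
--     cov = 0
--     in_seg = False
--     start = 0
--     for i in range(n):
--         cov += delta[i]
--         if cov > 0 and not in_seg:
--             start = i
--             in_seg = True
--         elif cov <= 0 and in_seg:
--             segments.append((start, i - 1, prefix[i] - prefix[start]))
--             in_seg = False
--     if in_seg:
--         segments.append((start, n - 1, prefix[n] - prefix[start]))
--     return segments
-- ===== Notes on version B (the rewrite author's own statement) =====
-- stated objective: faster
-- what changed: Replaces the O(n*w) inner marking loop with a difference array (+1 at window start, -1 past its end) whose running prefix sum gives coverage, and replaces repeated slice sums with one precomputed prefix-sum array.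
import Mathlib
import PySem

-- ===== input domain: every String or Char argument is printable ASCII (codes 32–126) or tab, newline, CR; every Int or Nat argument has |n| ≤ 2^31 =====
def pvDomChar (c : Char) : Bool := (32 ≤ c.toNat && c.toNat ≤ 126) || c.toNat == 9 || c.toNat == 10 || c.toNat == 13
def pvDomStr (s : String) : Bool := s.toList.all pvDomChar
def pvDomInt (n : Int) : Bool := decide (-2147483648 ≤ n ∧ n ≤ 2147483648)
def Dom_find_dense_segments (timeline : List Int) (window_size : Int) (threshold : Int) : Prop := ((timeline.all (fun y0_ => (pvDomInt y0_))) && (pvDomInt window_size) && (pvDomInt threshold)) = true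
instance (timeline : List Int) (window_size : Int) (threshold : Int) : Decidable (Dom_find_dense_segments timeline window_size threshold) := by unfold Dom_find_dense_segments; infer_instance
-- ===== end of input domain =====

-- B replaces A's O(n·w) repeated window-marking by a difference array with a running
-- prefix sum (coverage) and a precomputed prefix-sum array for segment totals (faster, O(n)).


-- ===== PORT A =====
-- inner loop: for j in range(i, i + window_size): if j < n: dense_flags[j] = 1
-- (range(i, i+w) has w.toNat elements starting at i; exact for every w, since Python's range is empty for w < 0)
def pvAMark (flags : List Int) (i wn n : Nat) : List Int :=
  (List.range' i wn).foldl (fun fl j => if j < n then fl.set j 1 else fl) flags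

-- outer loop of A: i counts up, k is the number of remaining iterations of range(n - window_size + 1)
def pvALoop (t : List Int) (w thr : Int) (n : Nat) : Nat → Nat → Int → List Int → List Int
  | _, 0, _, flags => flags
  | i, k+1, ws, flags =>
    let ws' := if 0 < i then
        ws - PySem.List.pyGetD t ((i : Int) - 1) 0 + PySem.List.pyGetD t ((i : Int) + w - 1) 0
      else ws
    let flags' := if thr ≤ ws' then pvAMark flags i w.toNat n else flags
    pvALoop t w thr n (i+1) k ws' flags'

-- the enumerate-scan of A over dense_flags (i = current index, st = seg_start, acc = segments)
def pvAScan (t : List Int) (n : Nat) : List Int → Nat → Bool → Nat → List (List Int) → List (List Int)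
  | [], _, inseg, st, acc =>
    if inseg then
      acc ++ [[(st : Int), (n : Int) - 1, (PySem.List.slice t (some (st : Int)) (some ((n : Int) - 1 + 1))).sum]]
    else acc
  | f :: fs, i, inseg, st, acc =>
    if f ≠ 0 ∧ inseg = false then pvAScan t n fs (i+1) true i acc
    else if f = 0 ∧ inseg = true then
      pvAScan t n fs (i+1) false st
        (acc ++ [[(st : Int), (i : Int) - 1, (PySem.List.slice t (some (st : Int)) (some ((i : Int) - 1 + 1))).sum]])
    else pvAScan t n fs (i+1) inseg st acc

def find_dense_segments (timeline : List Int) (window_size : Int) (threshold : Int) : List (List Int) :=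
  let n := timeline.length
  let flags := pvALoop timeline window_size threshold n 0 ((n : Int) - window_size + 1).toNat
      (PySem.List.slice timeline none (some window_size)).sum (List.replicate n 0)
  pvAScan timeline n flags 0 false 0 []

-- ===== PORT B =====
-- prefix = [0]; for x in timeline: prefix.append(prefix[-1] + x)
def pvPrefix (last : Int) : List Int → List Int
  | [] => [last]
  | x :: xs => last :: pvPrefix (last + x) xs

-- for l in range(n - window_size + 1): if prefix[l+w] - prefix[l] >= threshold: delta[l] += 1; delta[l+w] -= 1
-- (index l + w written (l + w.toNat); exact for 0 ≤ w, the Pre_ domain)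
def pvBDelta (pre : List Int) (w thr : Int) : Nat → Nat → List Int → List Int
  | _, 0, delta => delta
  | l, k+1, delta =>
    let delta' :=
      if thr ≤ PySem.List.pyGetD pre ((l : Int) + w) 0 - PySem.List.pyGetD pre (l : Int) 0 then
        let d1 := delta.set l (delta.getD l 0 + 1)
        d1.set (l + w.toNat) (d1.getD (l + w.toNat) 0 - 1)
      else delta
    pvBDelta pre w thr (l+1) k delta'

-- for i in range(n): cov += delta[i]; segment open/close on cov > 0
def pvBScan (pre delta : List Int) (n : Nat) : Nat → Nat → Int → Bool → Nat → List (List Int) → List (List Int)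
  | _, 0, _, inseg, st, acc =>
    if inseg then acc ++ [[(st : Int), (n : Int) - 1, pre.getD n 0 - pre.getD st 0]] else acc
  | i, k+1, cov, inseg, st, acc =>
    let cov' := cov + delta.getD i 0
    if 0 < cov' ∧ inseg = false then pvBScan pre delta n (i+1) k cov' true i acc
    else if cov' ≤ 0 ∧ inseg = true then
      pvBScan pre delta n (i+1) k cov' false st
        (acc ++ [[(st : Int), (i : Int) - 1, pre.getD i 0 - pre.getD st 0]])
    else pvBScan pre delta n (i+1) k cov' inseg st acc

def find_dense_segments_alt (timeline : List Int) (window_size : Int) (threshold : Int) : List (List Int) :=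
  let n := timeline.length
  let pre := pvPrefix 0 timeline
  let delta := pvBDelta pre window_size threshold 0 ((n : Int) - window_size + 1).toNat
      (List.replicate (n+1) 0)
  pvBScan pre delta n 0 n 0 false 0 []

-- ===== PRECONDITION & SPEC =====
-- Pre_ excludes exactly window_size < 0, on which A always raises IndexError (timeline[i-1] past the end).
def Pre_find_dense_segments (timeline : List Int) (window_size : Int) (threshold : Int) : Prop :=
  0 ≤ window_size
instance (timeline : List Int) (window_size : Int) (threshold : Int) : Decidable (Pre_find_dense_segments timeline window_size threshold) := by unfold Pre_find_dense_segments; infer_instance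

def pvWitness_find_dense_segments : List Int × Int × Int := ([3, 0, 4, 1, 0, 5], 2, 4)

def Spec_find_dense_segments (timeline : List Int) (window_size : Int) (threshold : Int) (out : List (List Int)) : Prop := out = find_dense_segments_alt timeline window_size threshold
instance (timeline : List Int) (window_size : Int) (threshold : Int) (out : List (List Int)) : Decidable (Spec_find_dense_segments timeline window_size threshold out) := by unfold Spec_find_dense_segments; infer_instance

-- ===== CLAIM (what is proved, stated in full; the proofs are below) =====
def Claim_equal_find_dense_segments : Prop := ∀ (timeline : List Int) (window_size : Int) (threshold : Int), Dom_find_dense_segments timeline window_size threshold → Pre_find_dense_segments timeline window_size threshold → Spec_find_dense_segments timeline window_size threshold (find_dense_segments timeline window_size threshold)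

-- ===== LEMMAS AND PROOFS =====

-- sum of the first k elements of the timeline
def pvP (t : List Int) (k : Nat) : Int := (t.take k).sum
-- window sum starting at l
def pvW (t : List Int) (wn l : Nat) : Int := pvP t (l + wn) - pvP t l
-- qualifying window start
def pvQ (t : List Int) (wn : Nat) (thr : Int) (l : Nat) : Bool := decide (thr ≤ pvW t wn l)
-- is index j covered by a qualifying window with start < i
def pvCovB (t : List Int) (wn : Nat) (thr : Int) (i j : Nat) : Bool :=
  (List.range i).any (fun l => pvQ t wn thr l && decide (l ≤ j) && decide (j < l + wn))
-- qualifying starts l < i with f l m (used for the difference-array partial sums)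
def pvCnt (t : List Int) (wn : Nat) (thr : Int) (i m : Nat) (f : Nat → Nat → Bool) : Nat :=
  (List.range i).countP (fun l => pvQ t wn thr l && f l m)

theorem pvP_succ (t : List Int) (k : Nat) (hk : k < t.length) :
    pvP t (k+1) = pvP t k + t.getD k 0 := by
  unfold pvP
  rw [List.take_add_one, List.sum_append]
  simp [List.getD, List.getElem?_eq_getElem hk]

theorem pvPrefix_getD (t : List Int) (c : Int) (k : Nat) (hk : k ≤ t.length) :
    (pvPrefix c t).getD k 0 = c + pvP t k := by
  induction t generalizing c k with
  | nil => simp at hk; simp [hk, pvPrefix, pvP]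
  | cons x xs ih =>
    cases k with
    | zero => simp [pvPrefix, pvP]
    | succ k =>
      simp only [pvPrefix, List.getD_cons_succ]
      rw [ih (c+x) k (by simpa using hk)]
      simp [pvP, add_assoc]

theorem pvSliceSum (t : List Int) (a b : Nat) (hab : a ≤ b) (_hb : b ≤ t.length) :
    (PySem.List.slice t (some (a : Int)) (some (b : Int))).sum = pvP t b - pvP t a := by
  rw [PySem.List.slice_natCast]
  have h : t.take b = t.take a ++ (t.drop a).take (b - a) := by
    rw [← List.take_add]
    congr 1
    omega
  have := congrArg List.sum h
  simp [List.sum_append] at this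
  simp [pvP]
  omega

theorem pvSum_take_succ (xs : List Int) (k : Nat) (h : k < xs.length) :
    (xs.take (k+1)).sum = (xs.take k).sum + xs.getD k 0 := by
  rw [List.take_add_one, List.sum_append]
  simp [List.getD, List.getElem?_eq_getElem h]

theorem pvSum_set (xs : List Int) (p : Nat) (v : Int) (h : p < xs.length) :
    (xs.set p v).sum = xs.sum - xs.getD p 0 + v := by
  induction xs generalizing p with
  | nil => simp at h
  | cons x xs ih =>
    cases p with
    | zero => simp [List.set]; ring
    | succ p =>
      simp only [List.set, List.sum_cons, List.getD_cons_succ]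
      rw [ih p (by simpa using h)]
      ring

theorem pvSum_take_set (xs : List Int) (p m : Nat) (v : Int) (h : p < xs.length) :
    ((xs.set p v).take m).sum = (xs.take m).sum + (if p < m then v - xs.getD p 0 else 0) := by
  rw [List.take_set]
  by_cases hpm : p < m
  · rw [if_pos hpm]
    have hp' : p < (xs.take m).length := by simp; omega
    rw [pvSum_set _ _ _ hp']
    have : (xs.take m).getD p 0 = xs.getD p 0 := by
      simp [List.getD, hpm]
    rw [this]; ring
  · rw [if_neg hpm, List.set_eq_of_length_le (by simp; omega)]
    ring

theorem pvAMark_length (flags : List Int) (i wn n : Nat) :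
    (pvAMark flags i wn n).length = flags.length := by
  unfold pvAMark
  induction wn generalizing i flags with
  | zero => simp
  | succ w ih =>
    rw [List.range'_succ, List.foldl_cons, ih]
    split <;> simp

theorem pvAMark_getD (flags : List Int) (i wn n j : Nat) (hn : flags.length = n) :
    (pvAMark flags i wn n).getD j 0 =
      if i ≤ j ∧ j < i + wn ∧ j < n then 1 else flags.getD j 0 := by
  induction wn generalizing i flags with
  | zero => simp [pvAMark]; omega
  | succ w ih =>
    unfold pvAMark
    rw [List.range'_succ, List.foldl_cons]
    show (pvAMark (if i < n then flags.set i 1 else flags) (i+1) w n).getD j 0 = _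
    by_cases hi : i < n
    · rw [if_pos hi, ih _ _ (by simp [hn])]
      by_cases hij : i = j
      · subst hij
        simp [List.getD, List.getElem?_set_self (by omega : i < flags.length)]
        intro h; omega
      · have : (flags.set i 1).getD j 0 = flags.getD j 0 := by
          simp [List.getD, List.getElem?_set_ne hij]
        rw [this]
        congr 1
        simp only [eq_iff_iff]
        omega
    · rw [if_neg hi, ih _ _ hn]
      congr 1
      simp only [eq_iff_iff]
      omega

theorem pvCovB_succ (t : List Int) (wn : Nat) (thr : Int) (i j : Nat) :
    pvCovB t wn thr (i+1) j
      = (pvCovB t wn thr i j || (pvQ t wn thr i && decide (i ≤ j) && decide (j < i + wn))) := by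
  unfold pvCovB
  rw [List.range_succ, List.any_append]
  simp

theorem pvW_step (t : List Int) (wn i : Nat) (h1 : 1 ≤ i) (h2 : i + wn ≤ t.length) :
    pvW t wn i = pvW t wn (i-1) - t.getD (i-1) 0 + t.getD (i-1+wn) 0 := by
  have e1 : pvP t i = pvP t (i-1) + t.getD (i-1) 0 := by
    have := pvP_succ t (i-1) (by omega)
    rwa [show i - 1 + 1 = i by omega] at this
  have e2 : pvP t (i + wn) = pvP t (i-1+wn) + t.getD (i-1+wn) 0 := by
    have := pvP_succ t (i-1+wn) (by omega)
    rwa [show i - 1 + wn + 1 = i + wn by omega] at this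
  unfold pvW
  rw [e1, e2]
  ring

theorem pvALoop_length (t : List Int) (w thr : Int) :
    ∀ (k i : Nat) (ws : Int) (flags : List Int),
      (pvALoop t w thr t.length i k ws flags).length = flags.length := by
  intro k
  induction k with
  | zero => intro i ws flags; rfl
  | succ k ih =>
    intro i ws flags
    show (pvALoop t w thr t.length (i+1) k
        (if 0 < i then ws - PySem.List.pyGetD t ((i : Int) - 1) 0 + PySem.List.pyGetD t ((i : Int) + w - 1) 0 else ws)
        (if thr ≤ _ then pvAMark flags i w.toNat t.length else flags)).length = _
    rw [ih]
    split <;> split <;> first | rw [pvAMark_length] | rfl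

theorem pvALoop_flags (t : List Int) (w thr : Int) (hw : 0 ≤ w) :
    ∀ (k i : Nat) (ws : Int) (flags : List Int),
      i + k = ((t.length : Int) - w + 1).toNat →
      (0 < k → (if i = 0 then ws = pvW t w.toNat 0 else ws = pvW t w.toNat (i-1))) →
      flags.length = t.length →
      (∀ j, j < t.length → flags.getD j 0 = if pvCovB t w.toNat thr i j then 1 else 0) →
      ∀ j, j < t.length →
        (pvALoop t w thr t.length i k ws flags).getD j 0 =
          if pvCovB t w.toNat thr (i + k) j then 1 else 0 := by
  intro k
  induction k with
  | zero =>
    intro i ws flags _ _ _ hflags j hj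
    exact hflags j hj
  | succ k ih =>
    intro i ws flags hcnt hws hlen hflags j hj
    have hwn : w.toNat ≤ t.length := by omega
    have hi : i + w.toNat ≤ t.length := by omega
    show (pvALoop t w thr t.length (i+1) k
        (if 0 < i then ws - PySem.List.pyGetD t ((i : Int) - 1) 0 + PySem.List.pyGetD t ((i : Int) + w - 1) 0 else ws)
        (if thr ≤ _ then pvAMark flags i w.toNat t.length else flags)).getD j 0 = _
    set ws' := (if 0 < i then ws - PySem.List.pyGetD t ((i : Int) - 1) 0 + PySem.List.pyGetD t ((i : Int) + w - 1) 0 else ws) with hws'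
    have hwsv : ws' = pvW t w.toNat i := by
      by_cases h0 : 0 < i
      · have g1 : PySem.List.pyGetD t ((i : Int) - 1) 0 = t.getD (i-1) 0 := by
          rw [show ((i : Int) - 1) = ((i - 1 : Nat) : Int) by omega, PySem.List.pyGetD_natCast]
        have g2 : PySem.List.pyGetD t ((i : Int) + w - 1) 0 = t.getD (i-1+w.toNat) 0 := by
          rw [show ((i : Int) + w - 1) = ((i - 1 + w.toNat : Nat) : Int) by omega, PySem.List.pyGetD_natCast]
        have h' := hws (by omega)
        rw [if_neg (by omega)] at h'
        rw [hws', if_pos h0, g1, g2, h']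
        exact (pvW_step t w.toNat i (by omega) hi).symm
      · have : i = 0 := by omega
        subst this
        rw [hws', if_neg (by omega)]
        have := hws (by omega)
        simpa using this
    rw [hwsv]
    have hstep : ∀ j', j' < t.length →
        (if thr ≤ pvW t w.toNat i then pvAMark flags i w.toNat t.length else flags).getD j' 0
          = if pvCovB t w.toNat thr (i+1) j' then 1 else 0 := by
      intro j' hj'
      rw [pvCovB_succ]
      by_cases hq : thr ≤ pvW t w.toNat i
      · rw [if_pos hq, pvAMark_getD _ _ _ _ _ hlen, hflags j' hj']
        have hqb : pvQ t w.toNat thr i = true := by simp [pvQ, hq]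
        by_cases hc : i ≤ j' ∧ j' < i + w.toNat ∧ j' < t.length
        · simp [hc.1, hc.2.1, hqb, hc]
        · have : ¬(i ≤ j' ∧ j' < i + w.toNat) := by omega
          rw [if_neg hc]
          rcases (not_and_or.mp this) with h | h <;>
            simp [hqb, h]
      · rw [if_neg hq, hflags j' hj']
        have hqb : pvQ t w.toNat thr i = false := by simp [pvQ, hq]
        simp [hqb]
    have := ih (i+1)
      (pvW t w.toNat i)
      (if thr ≤ pvW t w.toNat i then pvAMark flags i w.toNat t.length else flags)
      (by omega)
      (by intro _; rw [if_neg (by omega)]; simp)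
      (by split <;> simp [pvAMark_length, hlen])
      hstep j hj
    rw [show i + (k+1) = i + 1 + k by omega]
    exact this

theorem pvCnt_succ (t : List Int) (wn : Nat) (thr : Int) (i m : Nat) (f : Nat → Nat → Bool) :
    pvCnt t wn thr (i+1) m f = pvCnt t wn thr i m f + (if pvQ t wn thr i && f i m then 1 else 0) := by
  unfold pvCnt
  rw [List.range_succ, List.countP_append]
  simp [List.countP_cons]

theorem pvBDelta_length (pre : List Int) (w thr : Int) :
    ∀ (k i : Nat) (delta : List Int),
      (pvBDelta pre w thr i k delta).length = delta.length := by
  intro k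
  induction k with
  | zero => intro i delta; rfl
  | succ k ih =>
    intro i delta
    show (pvBDelta pre w thr (i+1) k _).length = _
    rw [ih]
    split <;> simp

theorem pvBDelta_sum (t : List Int) (w thr : Int) (hw : 0 ≤ w) :
    ∀ (k i : Nat) (delta : List Int),
      i + k = ((t.length : Int) - w + 1).toNat →
      delta.length = t.length + 1 →
      (∀ m, (delta.take m).sum =
        (pvCnt t w.toNat thr i m (fun l m => decide (l < m)) : Int)
          - pvCnt t w.toNat thr i m (fun l m => decide (l + w.toNat < m))) →
      ∀ m, ((pvBDelta (pvPrefix 0 t) w thr i k delta).take m).sum =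
        (pvCnt t w.toNat thr (i+k) m (fun l m => decide (l < m)) : Int)
          - pvCnt t w.toNat thr (i+k) m (fun l m => decide (l + w.toNat < m)) := by
  intro k
  induction k with
  | zero => intro i delta _ _ hsum m; exact hsum m
  | succ k ih =>
    intro i delta hcnt hlen hsum m
    have hwn : w.toNat ≤ t.length := by omega
    have hiw : i + w.toNat ≤ t.length := by omega
    have g1 : PySem.List.pyGetD (pvPrefix 0 t) ((i : Int) + w) 0 = pvP t (i + w.toNat) := by
      rw [show ((i : Int) + w) = ((i + w.toNat : Nat) : Int) by omega, PySem.List.pyGetD_natCast,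
        pvPrefix_getD t 0 _ hiw]
      ring
    have g2 : PySem.List.pyGetD (pvPrefix 0 t) ((i : Int)) 0 = pvP t i := by
      rw [PySem.List.pyGetD_natCast, pvPrefix_getD t 0 _ (by omega)]
      ring
    show ((pvBDelta (pvPrefix 0 t) w thr (i+1) k
      (if thr ≤ PySem.List.pyGetD (pvPrefix 0 t) ((i : Int) + w) 0 - PySem.List.pyGetD (pvPrefix 0 t) ((i : Int)) 0 then
        (delta.set i (delta.getD i 0 + 1)).set (i + w.toNat)
          (((delta.set i (delta.getD i 0 + 1)).getD (i + w.toNat) 0) - 1)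
      else delta)).take m).sum = _
    rw [g1, g2]
    have hq : (thr ≤ pvP t (i + w.toNat) - pvP t i) ↔ pvQ t w.toNat thr i = true := by
      simp [pvQ, pvW]
    have hnew : ∀ m', ((if thr ≤ pvP t (i + w.toNat) - pvP t i then
        (delta.set i (delta.getD i 0 + 1)).set (i + w.toNat)
          (((delta.set i (delta.getD i 0 + 1)).getD (i + w.toNat) 0) - 1)
      else delta).take m').sum =
        (pvCnt t w.toNat thr (i+1) m' (fun l m => decide (l < m)) : Int)
          - pvCnt t w.toNat thr (i+1) m' (fun l m => decide (l + w.toNat < m)) := by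
      intro m'
      rw [pvCnt_succ, pvCnt_succ]
      by_cases hqq : thr ≤ pvP t (i + w.toNat) - pvP t i
      · rw [if_pos hqq]
        have hqb : pvQ t w.toNat thr i = true := hq.mp hqq
        rw [pvSum_take_set _ _ _ _ (by simp [hlen]; omega),
            pvSum_take_set _ _ _ _ (by omega), hsum m']
        have e1 : (delta.set i (delta.getD i 0 + 1)).getD (i + w.toNat) 0 - 1
            - (delta.set i (delta.getD i 0 + 1)).getD (i + w.toNat) 0 = -1 := by ring
        simp only [hqb, Bool.true_and, e1]
        have e2 : delta.getD i 0 + 1 - delta.getD i 0 = 1 := by ring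
        rw [e2]
        push_cast
        simp only [decide_eq_true_eq]
        split_ifs <;> omega
      · rw [if_neg hqq, hsum m']
        have hqb : pvQ t w.toNat thr i = false := by
          simp [pvQ, pvW]; omega
        simp [hqb]
    have := ih (i+1)
      (if thr ≤ pvP t (i + w.toNat) - pvP t i then
        (delta.set i (delta.getD i 0 + 1)).set (i + w.toNat)
          (((delta.set i (delta.getD i 0 + 1)).getD (i + w.toNat) 0) - 1)
      else delta)
      (by omega)
      (by split <;> simp [hlen])
      hnew m
    rw [show i + (k+1) = i + 1 + k by omega]
    exact this

theorem pvCov_pos_iff (t : List Int) (w thr : Int) (_hw : 0 ≤ w) (cnt j : Nat) :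
    (0 < (pvCnt t w.toNat thr cnt (j+1) (fun l m => decide (l < m)) : Int)
          - pvCnt t w.toNat thr cnt (j+1) (fun l m => decide (l + w.toNat < m)))
      ↔ pvCovB t w.toNat thr cnt j = true := by
  have key : (pvCnt t w.toNat thr cnt (j+1) (fun l m => decide (l < m)) : Int)
      - pvCnt t w.toNat thr cnt (j+1) (fun l m => decide (l + w.toNat < m))
      = ((List.range cnt).countP (fun l => pvQ t w.toNat thr l && decide (l ≤ j) && decide (j < l + w.toNat)) : Int) := by
    induction cnt with
    | zero => simp [pvCnt]
    | succ c ih =>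
      rw [pvCnt_succ, pvCnt_succ, List.range_succ, List.countP_append]
      simp only [List.countP_cons, List.countP_nil, Nat.zero_add]
      push_cast
      rw [← ih]
      cases hq : pvQ t w.toNat thr c <;>
        simp only [Bool.true_and, Bool.false_and, decide_eq_true_eq,
          Bool.and_eq_true, decide_eq_true_eq] <;>
        split_ifs <;> (try push_cast) <;> first | contradiction | omega
  rw [key]
  rw [show pvCovB t w.toNat thr cnt j
      = (List.range cnt).any (fun l => pvQ t w.toNat thr l && decide (l ≤ j) && decide (j < l + w.toNat)) from rfl]
  constructor
  · intro h
    have : 0 < (List.range cnt).countP (fun l => pvQ t w.toNat thr l && decide (l ≤ j) && decide (j < l + w.toNat)) := by omega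
    rw [List.countP_pos_iff] at this
    rw [List.any_eq_true]
    obtain ⟨a, ha, hpa⟩ := this
    exact ⟨a, ha, hpa⟩
  · intro h
    rw [List.any_eq_true] at h
    obtain ⟨a, ha, hpa⟩ := h
    have : 0 < (List.range cnt).countP (fun l => pvQ t w.toNat thr l && decide (l ≤ j) && decide (j < l + w.toNat)) :=
      List.countP_pos_iff.mpr ⟨a, ha, hpa⟩
    omega

theorem pvScan_eq (t : List Int) (delta : List Int)
    (hd : delta.length = t.length + 1) :
    ∀ (fs : List Int) (i : Nat) (cov : Int) (inseg : Bool) (st : Nat)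
      (acc : List (List Int)),
      i + fs.length = t.length →
      cov = (delta.take i).sum →
      (∀ m, m < fs.length → (fs.getD m 0 ≠ 0 ↔ 0 < (delta.take (i + m + 1)).sum)) →
      (inseg = true → st ≤ i) →
      pvAScan t t.length fs i inseg st acc
        = pvBScan (pvPrefix 0 t) delta t.length i fs.length cov inseg st acc := by
  intro fs
  induction fs with
  | nil =>
    intro i cov inseg st acc hn _ _ hst
    simp only [List.length_nil, Nat.add_zero] at hn
    subst hn
    simp only [List.length_nil]
    unfold pvAScan pvBScan
    cases inseg with
    | false => rfl
    | true =>
      have hsti := hst rfl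
      rw [if_pos rfl, if_pos rfl]
      have e1 : ((t.length : Int) - 1 + 1) = ((t.length : Nat) : Int) := by ring
      rw [e1, pvSliceSum t st t.length hsti (le_refl _),
          pvPrefix_getD t 0 t.length (le_refl _), pvPrefix_getD t 0 st hsti]
      ring_nf
  | cons f fs ih =>
    intro i cov inseg st acc hn hcov hm hst
    have hil : i < t.length := by simp at hn; omega
    have hcov' : cov + delta.getD i 0 = (delta.take (i+1)).sum := by
      rw [hcov, ← pvSum_take_succ _ _ (by omega)]
    have hf : (f ≠ 0) ↔ (0 < cov + delta.getD i 0) := by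
      rw [hcov']
      have := hm 0 (by simp)
      simpa using this
    show pvAScan t t.length (f :: fs) i inseg st acc
        = pvBScan (pvPrefix 0 t) delta t.length i (fs.length + 1) cov inseg st acc
    unfold pvAScan pvBScan
    simp only []
    have hmnext : ∀ m, m < fs.length → (fs.getD m 0 ≠ 0 ↔ 0 < (delta.take ((i+1) + m + 1)).sum) := by
      intro m hmm
      have := hm (m+1) (by simp; omega)
      rw [List.getD_cons_succ] at this
      rw [show (i+1) + m + 1 = i + (m+1) + 1 by omega]
      exact this
    by_cases hfz : f ≠ 0
    · have hcpos : 0 < cov + delta.getD i 0 := hf.mp hfz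
      cases inseg with
      | true =>
        rw [if_neg (by simp), if_neg (by rintro ⟨h, _⟩; exact hfz h),
            if_neg (by simp), if_neg (by rintro ⟨h, _⟩; omega)]
        exact ih (i+1) _ true st acc (by simp at hn ⊢; omega) hcov' hmnext
          (fun _ => le_trans (hst rfl) (by omega))
      | false =>
        rw [if_pos (by exact ⟨hfz, rfl⟩), if_pos (by exact ⟨hcpos, rfl⟩)]
        exact ih (i+1) _ true i acc (by simp at hn ⊢; omega) hcov' hmnext
          (fun _ => by omega)
    · have hz : f = 0 := by omega
      have hcnp : ¬ (0 < cov + delta.getD i 0) := fun h => hfz (hf.mpr h)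
      cases inseg with
      | false =>
        rw [if_neg (by rintro ⟨h, _⟩; exact h hz), if_neg (by simp),
            if_neg (by rintro ⟨h, _⟩; exact hcnp h), if_neg (by simp)]
        exact ih (i+1) _ false st acc (by simp at hn ⊢; omega) hcov' hmnext
          (by simp)
      | true =>
        rw [if_neg (by simp), if_pos (by exact ⟨hz, rfl⟩),
            if_neg (by simp), if_pos (by exact ⟨by omega, rfl⟩)]
        have hsti := hst rfl
        have e1 : ((i : Int) - 1 + 1) = ((i : Nat) : Int) := by ring
        rw [e1, pvSliceSum t st i hsti (by omega),
            pvPrefix_getD t 0 i (by omega), pvPrefix_getD t 0 st (by omega)]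
        have e2 : (0 : Int) + pvP t i - (0 + pvP t st) = pvP t i - pvP t st := by ring
        rw [e2]
        exact ih (i+1) _ false st _ (by simp at hn ⊢; omega) hcov' hmnext (by simp)

-- final assembly: both programs compute the segment scan of the same coverage information
theorem pvMain (t : List Int) (w thr : Int) (hw : 0 ≤ w) :
    find_dense_segments t w thr = find_dense_segments_alt t w thr := by
  show pvAScan t t.length
      (pvALoop t w thr t.length 0 ((t.length : Int) - w + 1).toNat
        (PySem.List.slice t none (some w)).sum (List.replicate t.length 0)) 0 false 0 []
    = pvBScan (pvPrefix 0 t)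
        (pvBDelta (pvPrefix 0 t) w thr 0 ((t.length : Int) - w + 1).toNat
          (List.replicate (t.length + 1) 0)) t.length 0 t.length 0 false 0 []
  set flags := pvALoop t w thr t.length 0 ((t.length : Int) - w + 1).toNat
      (PySem.List.slice t none (some w)).sum (List.replicate t.length 0) with hflags
  set delta := pvBDelta (pvPrefix 0 t) w thr 0 ((t.length : Int) - w + 1).toNat
      (List.replicate (t.length + 1) 0) with hdelta
  have hfl : flags.length = t.length := by
    rw [hflags, pvALoop_length, List.length_replicate]
  have hdl : delta.length = t.length + 1 := by
    rw [hdelta, pvBDelta_length, List.length_replicate]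
  have hdsum : ∀ m, (delta.take m).sum =
      (pvCnt t w.toNat thr ((t.length : Int) - w + 1).toNat m (fun l m => decide (l < m)) : Int)
        - pvCnt t w.toNat thr ((t.length : Int) - w + 1).toNat m (fun l m => decide (l + w.toNat < m)) := by
    intro m
    rw [hdelta]
    have := pvBDelta_sum t w thr hw (((t.length : Int) - w + 1).toNat) 0
      (List.replicate (t.length + 1) 0) (by omega) (by simp)
      (by intro m'; simp [pvCnt, List.take_replicate]) m
    simpa using this
  have hfget : ∀ j, j < t.length →
      flags.getD j 0 = if pvCovB t w.toNat thr ((t.length : Int) - w + 1).toNat j then 1 else 0 := by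
    intro j hj
    rw [hflags]
    have := pvALoop_flags t w thr hw (((t.length : Int) - w + 1).toNat) 0
      (PySem.List.slice t none (some w)).sum (List.replicate t.length 0) (by omega)
      (by
        intro hk
        rw [if_pos rfl]
        have hwn : w.toNat ≤ t.length := by omega
        rw [PySem.List.slice_to t hw]
        unfold pvW pvP
        simp)
      (by simp)
      (by
        intro j' hj'
        simp [pvCovB])
      j hj
    simpa using this
  have := pvScan_eq t delta hdl flags 0 0 false 0 [] (by simpa using hfl) (by simp)
    (by
      intro m hm
      rw [hfget m (by omega)]
      rw [show (0 + m + 1) = m + 1 by omega, hdsum (m+1)]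
      simp only [pvCov_pos_iff t w thr hw]
      split_ifs with h <;> simp [h])
    (by simp)
  rw [this, hfl]

-- ===== VERDICT (by name: the statement is the Claim_ definition above) =====
theorem find_dense_segments_spec : Claim_equal_find_dense_segments := by
  unfold Claim_equal_find_dense_segments
  intro t w thr _ hpre
  unfold Spec_find_dense_segments
  exact pvMain t w thr hpre
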